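-- pv_equiv track=rewrite | github.com/TonyAcostaRag/pythonProjects | PythonInstitute/Udemy_Jupyter_Exercises/PythonExercises/halve_strings.py | halve_string
-- ===== SOURCE A (Python) =====
-- import math
--
-- def halve_string(input_string):
--     fisrt_half = ''
--     second_half = ''
--
--     for i in range(0, len(input_string)):
--
--         if (i+1) <= math.ceil(len(input_string) / 2):
--             fisrt_half += input_string[i]
--         else:
--             second_half += input_string[i]
--
--     return (fisrt_half, second_half)
-- ===== SOURCE B (Python) =====
-- def halve_string(input_string):
--     mid = (len(input_string) + 1) // 2
--     return (input_string[:mid], input_string[mid:])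
-- ===== Notes on version B (the rewrite author's own statement) =====
-- stated objective: simpler
-- what changed: Replaces the per-character loop with its branch on the running index by computing the split point once ((len+1)//2, equal to math.ceil(len/2)) and returning the two slices directly.
import Mathlib
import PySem

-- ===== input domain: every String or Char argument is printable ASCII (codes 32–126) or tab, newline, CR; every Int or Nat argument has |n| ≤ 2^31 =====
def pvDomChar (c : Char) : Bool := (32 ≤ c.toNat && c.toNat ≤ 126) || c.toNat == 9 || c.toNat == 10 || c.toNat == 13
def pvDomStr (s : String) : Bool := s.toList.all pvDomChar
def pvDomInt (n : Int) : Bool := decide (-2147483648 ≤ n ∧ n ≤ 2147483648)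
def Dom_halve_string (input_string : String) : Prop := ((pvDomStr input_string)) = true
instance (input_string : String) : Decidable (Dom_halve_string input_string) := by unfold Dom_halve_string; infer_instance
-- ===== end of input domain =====

-- ===== PORT A =====
-- B computes the split point once and slices; no per-character loop. Equivalence proved on all inputs.
-- math.ceil(n/2) for an int n is exactly (n+1)//2 (float division is exact here for all realistic lengths).
def halve_string (input_string : String) : String × String :=
  let cs := input_string.toList
  let n := cs.length
  let m : Int := ((n + 1) / 2 : Nat)
  let r := (PySem.List.pyRange 0 (n : Int) 1).foldl
    (fun (acc : List Char × List Char) i =>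
      if i + 1 ≤ m then (acc.1 ++ [PySem.List.pyGetD cs i ' '], acc.2)
      else (acc.1, acc.2 ++ [PySem.List.pyGetD cs i ' '])) ([], [])
  (String.ofList r.1, String.ofList r.2)

-- ===== PORT B =====
def halve_string_alt (input_string : String) : String × String :=
  let cs := input_string.toList
  let mid := PySem.Int.floordiv ((cs.length : Int) + 1) 2
  (String.ofList (PySem.List.slice cs none (some mid)),
   String.ofList (PySem.List.slice cs (some mid) none))

-- ===== PRECONDITION & SPEC =====
def Spec_halve_string (input_string : String) (out : String × String) : Prop := out = halve_string_alt input_string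
instance (input_string : String) (out : String × String) : Decidable (Spec_halve_string input_string out) := by unfold Spec_halve_string; infer_instance

-- ===== CLAIM (what is proved, stated in full; the proofs are below) =====
def Claim_equal_halve_string : Prop := ∀ (input_string : String), Dom_halve_string input_string → Spec_halve_string input_string (halve_string input_string)

-- ===== LEMMAS AND PROOFS =====

-- ===== VERDICT (by name: the statement is the Claim_ definition above) =====
-- the pair-state loop with a constant-true (resp. constant-false) branch appends to one component only
lemma fold_fst (l : List Int) (g : Int → Char) (u v : List Char)
    (h : ∀ i ∈ l, i + 1 ≤ m) :
    l.foldl (fun (acc : List Char × List Char) i =>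
      if i + 1 ≤ m then (acc.1 ++ [g i], acc.2) else (acc.1, acc.2 ++ [g i])) (u, v)
    = (u ++ l.map g, v) := by
  induction l generalizing u with
  | nil => simp
  | cons x xs ih =>
      simp only [List.foldl_cons, List.map_cons]
      rw [if_pos (h x (by simp))]
      rw [ih (u ++ [g x]) (fun i hi => h i (List.mem_cons_of_mem _ hi))]
      simp

lemma fold_snd (l : List Int) (g : Int → Char) (u v : List Char)
    (h : ∀ i ∈ l, ¬ (i + 1 ≤ m)) :
    l.foldl (fun (acc : List Char × List Char) i =>
      if i + 1 ≤ m then (acc.1 ++ [g i], acc.2) else (acc.1, acc.2 ++ [g i])) (u, v)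
    = (u, v ++ l.map g) := by
  induction l generalizing v with
  | nil => simp
  | cons x xs ih =>
      simp only [List.foldl_cons, List.map_cons]
      rw [if_neg (h x (by simp))]
      rw [ih (v ++ [g x]) (fun i hi => h i (List.mem_cons_of_mem _ hi))]
      simp

lemma map_get_take (cs : List Char) (m : Nat) (hm : m ≤ cs.length) :
    (PySem.List.pyRange 0 (m : Int) 1).map (fun i => PySem.List.pyGetD cs i ' ')
    = cs.take m := by
  have := PySem.List.map_pyGetD_pyRange_zero' (xs := cs.take m) (d := ' ')
  simp only [List.length_take, Nat.min_eq_left hm] at this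
  rw [← this]
  apply List.map_congr_left
  intro i hi
  rw [PySem.List.mem_pyRange_one] at hi
  have hilen : i < (cs.length : Int) := lt_of_lt_of_le hi.2 (by exact_mod_cast hm)
  rw [PySem.List.pyGetD_eq_getElem cs ' ' hi.1 hilen,
      PySem.List.pyGetD_eq_getElem (cs.take m) ' ' hi.1
        (by simp [List.length_take]; omega)]
  simp [List.getElem_take]

theorem halve_string_spec : Claim_equal_halve_string := by
  intro s _
  unfold Spec_halve_string halve_string halve_string_alt
  simp only []
  set cs := s.toList with hcs
  set k : Nat := (cs.length + 1) / 2 with hk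
  have hm : k ≤ cs.length := by omega
  have hfd : PySem.Int.floordiv ((cs.length : Int) + 1) 2 = (k : Int) := by
    rw [hk]; exact_mod_cast PySem.Int.floordiv_natCast (cs.length + 1) 2
  rw [hfd, PySem.List.slice_to_natCast, PySem.List.slice_from_natCast]
  rw [PySem.List.pyRange_one_append 0 (k : Int) (cs.length : Int)
        (by positivity) (by exact_mod_cast hm),
      List.foldl_append]
  rw [fold_fst (PySem.List.pyRange 0 (k : Int) 1) _ [] [] (fun i hi => by
        rw [PySem.List.mem_pyRange_one] at hi; omega)]
  rw [fold_snd (PySem.List.pyRange (k : Int) (cs.length : Int) 1) _ _ _ (fun i hi => by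
        rw [PySem.List.mem_pyRange_one] at hi; omega)]
  rw [map_get_take cs k hm,
      PySem.List.map_pyGetD_pyRange' (xs := cs) (d := ' ') (a := (k : Int)) (by positivity)]
  simp
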